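-- pv_equiv track=rewrite | github.com/kevoppa/japon | scripts/export_budget_workbook.py | render_sheet_html
-- ===== SOURCE A (Python) =====
-- def index_to_col(index: int) -> str:
--     chars: list[str] = []
--     while index > 0:
--         index, rem = divmod(index - 1, 26)
--         chars.append(chr(65 + rem))
--     return "".join(reversed(chars))
--
-- def escape_html(value: str) -> str:
--     return (
--         value.replace("&", "&amp;")
--         .replace("<", "&lt;")
--         .replace(">", "&gt;")
--         .replace('"', "&quot;")
--     )
--
-- def escape_attr(value: str) -> str:
--     return escape_html(value).replace("'", "&#39;")
--
-- def render_cell_content(value: str, href: str | None) -> str: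
--     if not value and not href:
--         return ""
--
--     if href:
--         label = escape_html(value or href)
--         safe_href = escape_attr(href)
--         return f'<a href="{safe_href}" target="_blank" rel="noreferrer noopener">{label}</a>'
--
--     if value.startswith("http://") or value.startswith("https://"):
--         safe_href = escape_attr(value)
--         return f'<a href="{safe_href}" target="_blank" rel="noreferrer noopener">{escape_html(value)}</a>'
--
--     return escape_html(value)
--
-- def render_sheet_html(
--     name: str,
--     max_row: int,
--     max_col: int,
--     cells: dict[tuple[int, int], dict[str, object]],
--     merges: list[dict[str, int]],
-- ) -> str:
--     covered: set[tuple[int, int]] = set()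
--     merge_map: dict[tuple[int, int], dict[str, int]] = {}
--
--     for merge in merges:
--         start = (merge["start_row"], merge["start_col"])
--         merge_map[start] = merge
--         for row in range(merge["start_row"], merge["end_row"] + 1):
--             for col in range(merge["start_col"], merge["end_col"] + 1):
--                 if (row, col) != start:
--                     covered.add((row, col))
--
--     parts: list[str] = []
--     parts.append('<div class="budget-sheet-frame">')
--     parts.append('<div class="budget-grid-scroll">')
--     parts.append('<table class="budget-grid" aria-label="Feuille {}">'.format(escape_attr(name)))
--     parts.append("<thead>")
--     parts.append("<tr>")
--     parts.append('<th class="budget-corner"></th>')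
--     for col in range(1, max_col + 1):
--         parts.append(f'<th class="budget-col-head">{index_to_col(col)}</th>')
--     parts.append("</tr>")
--     parts.append("</thead>")
--     parts.append("<tbody>")
--
--     for row in range(1, max_row + 1):
--         parts.append("<tr>")
--         parts.append(f'<th class="budget-row-head">{row}</th>')
--         for col in range(1, max_col + 1):
--             key = (row, col)
--             if key in covered:
--                 continue
--
--             cell = cells.get(key)
--             attrs: list[str] = []
--             classes = ["budget-cell"]
--             if not cell or (cell["value"] == "" and not cell["href"]):
--                 classes.append("is-empty")
--
--             merge = merge_map.get(key)
--             if merge: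
--                 colspan = merge["end_col"] - merge["start_col"] + 1
--                 rowspan = merge["end_row"] - merge["start_row"] + 1
--                 if colspan > 1:
--                     attrs.append(f'colspan="{colspan}"')
--                 if rowspan > 1:
--                     attrs.append(f'rowspan="{rowspan}"')
--
--             if cell and cell["style"]:
--                 attrs.append(f'style="{escape_attr(cell["style"])}"')
--
--             attrs.append(f'class="{" ".join(classes)}"')
--             content = render_cell_content(cell["value"], cell["href"]) if cell else ""
--             parts.append(f"<td {' '.join(attrs)}>{content}</td>")
--
--         parts.append("</tr>")
--
--     parts.append("</tbody></table></div></div>")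
--     return "".join(parts)
-- ===== SOURCE B (Python) =====
-- # B: drops A's `covered` set and `merge_map` dict precomputation; each cell decides
-- # coverage / its merge by scanning `merges` directly, and the HTML is assembled by
-- # joined comprehensions instead of an appended parts list. Objective: alternative.
--
-- def index_to_col(index: int) -> str:
--     chars: list[str] = []
--     while index > 0:
--         index, rem = divmod(index - 1, 26)
--         chars.append(chr(65 + rem))
--     return "".join(reversed(chars))
--
-- def escape_html(value: str) -> str:
--     return (
--         value.replace("&", "&amp;")
--         .replace("<", "&lt;")
--         .replace(">", "&gt;")
--         .replace('"', "&quot;")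
--     )
--
-- def escape_attr(value: str) -> str:
--     return escape_html(value).replace("'", "&#39;")
--
-- def render_cell_content(value: str, href: str | None) -> str:
--     if not value and not href:
--         return ""
--
--     if href:
--         label = escape_html(value or href)
--         safe_href = escape_attr(href)
--         return f'<a href="{safe_href}" target="_blank" rel="noreferrer noopener">{label}</a>'
--
--     if value.startswith("http://") or value.startswith("https://"):
--         safe_href = escape_attr(value)
--         return f'<a href="{safe_href}" target="_blank" rel="noreferrer noopener">{escape_html(value)}</a>'
--
--     return escape_html(value)
--
-- def render_sheet_html(name, max_row, max_col, cells, merges):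
--     def covered_at(row, col):
--         return any(
--             m["start_row"] <= row <= m["end_row"]
--             and m["start_col"] <= col <= m["end_col"]
--             and (row, col) != (m["start_row"], m["start_col"])
--             for m in merges
--         )
--
--     def merge_at(row, col):
--         found = None
--         for m in merges:
--             if m["start_row"] == row and m["start_col"] == col:
--                 found = m
--         return found
--
--     def td(row, col):
--         cell = cells.get((row, col))
--         attrs = []
--         classes = ["budget-cell"]
--         if not cell or (cell["value"] == "" and not cell["href"]):
--             classes.append("is-empty")
--         merge = merge_at(row, col)
--         if merge:
--             colspan = merge["end_col"] - merge["start_col"] + 1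
--             rowspan = merge["end_row"] - merge["start_row"] + 1
--             if colspan > 1:
--                 attrs.append(f'colspan="{colspan}"')
--             if rowspan > 1:
--                 attrs.append(f'rowspan="{rowspan}"')
--         if cell and cell["style"]:
--             attrs.append(f'style="{escape_attr(cell["style"])}"')
--         attrs.append(f'class="{" ".join(classes)}"')
--         content = render_cell_content(cell["value"], cell["href"]) if cell else ""
--         return f"<td {' '.join(attrs)}>{content}</td>"
--
--     head = "".join(
--         f'<th class="budget-col-head">{index_to_col(col)}</th>'
--         for col in range(1, max_col + 1)
--     )
--     body = "".join(
--         "<tr>"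
--         + f'<th class="budget-row-head">{row}</th>'
--         + "".join(
--             td(row, col)
--             for col in range(1, max_col + 1)
--             if not covered_at(row, col)
--         )
--         + "</tr>"
--         for row in range(1, max_row + 1)
--     )
--     return (
--         '<div class="budget-sheet-frame">'
--         + '<div class="budget-grid-scroll">'
--         + f'<table class="budget-grid" aria-label="Feuille {escape_attr(name)}">'
--         + "<thead>"
--         + "<tr>"
--         + '<th class="budget-corner"></th>'
--         + head
--         + "</tr>"
--         + "</thead>"
--         + "<tbody>"
--         + body
--         + "</tbody></table></div></div>"
--     )
-- ===== Notes on version B (the rewrite author's own statement) =====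
-- stated objective: alternative
-- what changed: B removes A's precomputed `covered` set and `merge_map` dict: each cell decides coverage and finds its (last-wins) merge by scanning the merges list directly, and the HTML is assembled from joined comprehensions instead of an appended parts list.
import Mathlib
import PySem

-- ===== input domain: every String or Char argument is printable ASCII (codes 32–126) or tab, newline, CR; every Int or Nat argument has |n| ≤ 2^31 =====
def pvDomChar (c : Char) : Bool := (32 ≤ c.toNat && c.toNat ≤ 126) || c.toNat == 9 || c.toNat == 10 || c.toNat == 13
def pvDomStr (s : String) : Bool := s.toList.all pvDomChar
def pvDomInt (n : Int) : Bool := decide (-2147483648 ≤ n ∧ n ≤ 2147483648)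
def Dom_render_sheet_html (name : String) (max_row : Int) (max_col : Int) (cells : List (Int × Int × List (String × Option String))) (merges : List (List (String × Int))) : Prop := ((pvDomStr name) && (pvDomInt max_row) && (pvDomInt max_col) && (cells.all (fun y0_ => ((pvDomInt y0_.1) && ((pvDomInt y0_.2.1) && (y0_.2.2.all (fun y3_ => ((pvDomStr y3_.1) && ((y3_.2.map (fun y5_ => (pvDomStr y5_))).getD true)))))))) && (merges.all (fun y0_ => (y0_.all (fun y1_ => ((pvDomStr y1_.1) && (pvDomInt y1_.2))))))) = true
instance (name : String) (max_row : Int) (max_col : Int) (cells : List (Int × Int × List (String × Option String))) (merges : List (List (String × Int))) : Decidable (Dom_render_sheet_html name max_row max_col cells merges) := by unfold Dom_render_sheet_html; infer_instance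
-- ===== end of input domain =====

-- B drops A's `covered` set and `merge_map` dict precomputation: each cell decides coverage and
-- its own merge by scanning `merges` directly, and the HTML is assembled by joined maps instead
-- of an appended parts list (objective: alternative; same return value).

-- ===== PORT A =====
-- shared module-level helpers (identical in Source A and Source B)

-- termination fact for index_to_col's while loop (cited by `decreasing_by`)
theorem indexToCol_dec (index : Int) (h : 0 < index) :
    (PySem.Int.floordiv (index - 1) 26).toNat < index.toNat := by
  have h1 : PySem.Int.floordiv (index - 1) 26 = (index - 1) / 26 :=
    PySem.Int.floordiv_eq_ediv_of_pos (by omega)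
  have h2 : (index - 1) / 26 ≤ index - 1 := Int.ediv_le_self _ (by omega)
  have h3 : 0 ≤ (index - 1) / 26 := Int.ediv_nonneg (by omega) (by omega)
  omega

def indexToColLoop (index : Int) (chars : List Char) : List Char :=
  if h : 0 < index then
    indexToColLoop (PySem.Int.floordiv (index - 1) 26)
      (chars ++ [Char.ofNat (65 + (PySem.Int.mod (index - 1) 26)).toNat])
  else chars
termination_by index.toNat
decreasing_by exact indexToCol_dec index h

def indexToCol (index : Int) : String :=
  String.ofList (indexToColLoop index []).reverse

def escapeHtml (v : String) : String :=
  PySem.Str.replace (PySem.Str.replace (PySem.Str.replace (PySem.Str.replace v "&" "&amp;") "<" "&lt;") ">" "&gt;") "\"" "&quot;"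

def escapeAttr (v : String) : String :=
  PySem.Str.replace (escapeHtml v) "'" "&#39;"

-- Python truthiness of a `str | None` value
def optTruthy (o : Option String) : Bool :=
  match o with
  | none => false
  | some s => !(s == "")

-- Python truthiness of a `dict | None` cell (empty dict is falsy)
def cellTruthy (cell : Option (List (String × Option String))) : Bool :=
  match cell with
  | none => false
  | some l => !l.isEmpty

-- m[k] for a merge dict; the KeyError case (missing key) is excluded by Pre_
def mergeGet (m : List (String × Int)) (k : String) : Int :=
  ((PySem.Dict.mk m).get? k).getD 0

-- cell[k] for a cell dict; the KeyError case is excluded by Pre_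
def cellGet (cell : Option (List (String × Option String))) (k : String) : Option String :=
  ((PySem.Dict.mk (cell.getD [])).get? k).getD none

def renderCellContent (value href : Option String) : String :=
  if !optTruthy value && !optTruthy href then ""
  else if optTruthy href then
    "<a href=\"" ++ escapeAttr (href.getD "") ++ "\" target=\"_blank\" rel=\"noreferrer noopener\">"
      ++ escapeHtml ((if optTruthy value then value else href).getD "") ++ "</a>"
  else
    let v := value.getD ""
    if PySem.Str.startswith v "http://" || PySem.Str.startswith v "https://" then
      "<a href=\"" ++ escapeAttr v ++ "\" target=\"_blank\" rel=\"noreferrer noopener\">"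
        ++ escapeHtml v ++ "</a>"
    else escapeHtml v

-- the <td> construction, identical in both Pythons once the cell's merge (dict | None) is known
def tdCommon (cdict : PySem.Dict (Int × Int) (List (String × Option String)))
    (mergeOpt : Option (List (String × Int))) (row col : Int) : String :=
  let cell := cdict.get? (row, col)
  let attrs : List String := []
  let classes : List String := ["budget-cell"]
  let classes :=
    if !cellTruthy cell || (cellGet cell "value" == some "" && !optTruthy (cellGet cell "href"))
    then classes ++ ["is-empty"] else classes
  let mergeB : Bool := match mergeOpt with | none => false | some l => !l.isEmpty
  let attrs :=
    if mergeB then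
      let m := mergeOpt.getD []
      let colspan := mergeGet m "end_col" - mergeGet m "start_col" + 1
      let rowspan := mergeGet m "end_row" - mergeGet m "start_row" + 1
      let attrs := if colspan > 1 then attrs ++ ["colspan=\"" ++ PySem.Int.toStr colspan ++ "\""] else attrs
      if rowspan > 1 then attrs ++ ["rowspan=\"" ++ PySem.Int.toStr rowspan ++ "\""] else attrs
    else attrs
  let attrs :=
    if cellTruthy cell && optTruthy (cellGet cell "style") then
      attrs ++ ["style=\"" ++ escapeAttr ((cellGet cell "style").getD "") ++ "\""]
    else attrs
  let attrs := attrs ++ ["class=\"" ++ PySem.Str.join " " classes ++ "\""]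
  let content := if cellTruthy cell then renderCellContent (cellGet cell "value") (cellGet cell "href") else ""
  "<td " ++ PySem.Str.join " " attrs ++ ">" ++ content ++ "</td>"

-- A-side: the (start_row, start_col) key of a merge
def startOf (m : List (String × Int)) : Int × Int :=
  (mergeGet m "start_row", mergeGet m "start_col")

-- A-side: one merge's contribution to the `covered` set (the two nested range loops)
def covStep (cov : PySem.Set (Int × Int)) (m : List (String × Int)) : PySem.Set (Int × Int) :=
  (PySem.List.pyRange (mergeGet m "start_row") (mergeGet m "end_row" + 1) 1).foldl (fun cov row =>
    (PySem.List.pyRange (mergeGet m "start_col") (mergeGet m "end_col" + 1) 1).foldl (fun cov col =>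
      if (row, col) ≠ startOf m then PySem.Set.add cov (row, col) else cov) cov) cov

def render_sheet_html (name : String) (max_row : Int) (max_col : Int) (cells : List (Int × Int × List (String × Option String))) (merges : List (List (String × Int))) : String :=
  let cdict : PySem.Dict (Int × Int) (List (String × Option String)) :=
    PySem.Dict.mk (cells.map (fun e => ((e.1, e.2.1), e.2.2)))
  let st := merges.foldl
    (fun (st : PySem.Set (Int × Int) × PySem.Dict (Int × Int) (List (String × Int))) m =>
      (covStep st.1 m, st.2.insert (startOf m) m))
    (PySem.Set.empty, PySem.Dict.mk [])
  let covered := st.1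
  let merge_map := st.2
  let parts : List String := []
  let parts := parts ++ ["<div class=\"budget-sheet-frame\">"]
  let parts := parts ++ ["<div class=\"budget-grid-scroll\">"]
  let parts := parts ++ ["<table class=\"budget-grid\" aria-label=\"Feuille " ++ escapeAttr name ++ "\">"]
  let parts := parts ++ ["<thead>"]
  let parts := parts ++ ["<tr>"]
  let parts := parts ++ ["<th class=\"budget-corner\"></th>"]
  let parts := (PySem.List.pyRange 1 (max_col + 1) 1).foldl (fun parts col =>
    parts ++ ["<th class=\"budget-col-head\">" ++ indexToCol col ++ "</th>"]) parts
  let parts := parts ++ ["</tr>"]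
  let parts := parts ++ ["</thead>"]
  let parts := parts ++ ["<tbody>"]
  let parts := (PySem.List.pyRange 1 (max_row + 1) 1).foldl (fun parts row =>
    let parts := parts ++ ["<tr>"]
    let parts := parts ++ ["<th class=\"budget-row-head\">" ++ PySem.Int.toStr row ++ "</th>"]
    let parts := (PySem.List.pyRange 1 (max_col + 1) 1).foldl (fun parts col =>
      if PySem.Set.contains covered (row, col) then parts
      else parts ++ [tdCommon cdict (merge_map.get? (row, col)) row col]) parts
    parts ++ ["</tr>"]) parts
  let parts := parts ++ ["</tbody></table></div></div>"]
  PySem.Str.join "" parts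

-- ===== PORT B =====
-- B-side: does some merge cover (row, col) without starting there? (the `any(...)`)
def mergeCovers (merges : List (List (String × Int))) (row col : Int) : Bool :=
  merges.any (fun m =>
    decide (mergeGet m "start_row" ≤ row) && decide (row ≤ mergeGet m "end_row") &&
    decide (mergeGet m "start_col" ≤ col) && decide (col ≤ mergeGet m "end_col") &&
    !((row, col) == (mergeGet m "start_row", mergeGet m "start_col")))

-- B-side: the last merge starting at (row, col), if any (the `found` loop)
def mergeAt (merges : List (List (String × Int))) (row col : Int) : Option (List (String × Int)) :=
  merges.foldl (fun found m =>
    if mergeGet m "start_row" == row && mergeGet m "start_col" == col then some m else found) none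

def render_sheet_html_alt (name : String) (max_row : Int) (max_col : Int) (cells : List (Int × Int × List (String × Option String))) (merges : List (List (String × Int))) : String :=
  let cdict : PySem.Dict (Int × Int) (List (String × Option String)) :=
    PySem.Dict.mk (cells.map (fun e => ((e.1, e.2.1), e.2.2)))
  let head := PySem.Str.join "" ((PySem.List.pyRange 1 (max_col + 1) 1).map (fun col =>
    "<th class=\"budget-col-head\">" ++ indexToCol col ++ "</th>"))
  let body := PySem.Str.join "" ((PySem.List.pyRange 1 (max_row + 1) 1).map (fun row =>
    "<tr>"
    ++ ("<th class=\"budget-row-head\">" ++ PySem.Int.toStr row ++ "</th>")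
    ++ PySem.Str.join "" (((PySem.List.pyRange 1 (max_col + 1) 1).filter (fun col =>
          !mergeCovers merges row col)).map (fun col =>
          tdCommon cdict (mergeAt merges row col) row col))
    ++ "</tr>"))
  "<div class=\"budget-sheet-frame\">"
  ++ "<div class=\"budget-grid-scroll\">"
  ++ ("<table class=\"budget-grid\" aria-label=\"Feuille " ++ escapeAttr name ++ "\">")
  ++ "<thead>"
  ++ "<tr>"
  ++ "<th class=\"budget-corner\"></th>"
  ++ head
  ++ "</tr>"
  ++ "</thead>"
  ++ "<tbody>"
  ++ body
  ++ "</tbody></table></div></div>"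

-- ===== PRECONDITION & SPEC =====
def mergeHasKeys (m : List (String × Int)) : Prop :=
  (PySem.Dict.mk m).contains "start_row" = true ∧ (PySem.Dict.mk m).contains "start_col" = true ∧
  (PySem.Dict.mk m).contains "end_row" = true ∧ (PySem.Dict.mk m).contains "end_col" = true

def coveredProp (merges : List (List (String × Int))) (r c : Int) : Prop :=
  ∃ m ∈ merges, mergeGet m "start_row" ≤ r ∧ r ≤ mergeGet m "end_row" ∧
    mergeGet m "start_col" ≤ c ∧ c ≤ mergeGet m "end_col" ∧
    ¬(r = mergeGet m "start_row" ∧ c = mergeGet m "start_col")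

-- Pre_ excludes exactly the inputs on which the Python A raises KeyError: a merge dict missing one
-- of the four start/end keys, or a non-empty cell dict that is actually rendered (its key is in the
-- grid, not covered by a merge, and it is the dict the cells lookup returns) and is missing one of
-- "value"/"href"/"style".
def Pre_render_sheet_html (name : String) (max_row : Int) (max_col : Int) (cells : List (Int × Int × List (String × Option String))) (merges : List (List (String × Int))) : Prop :=
  (∀ m ∈ merges, mergeHasKeys m) ∧
  (∀ e ∈ cells,
    (1 ≤ e.1 ∧ e.1 ≤ max_row ∧ 1 ≤ e.2.1 ∧ e.2.1 ≤ max_col ∧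
     ¬ coveredProp merges e.1 e.2.1 ∧ e.2.2 ≠ [] ∧
     (PySem.Dict.mk (cells.map (fun e' => ((e'.1, e'.2.1), e'.2.2)))).get? (e.1, e.2.1) = some e.2.2) →
    ((PySem.Dict.mk e.2.2).contains "value" = true ∧ (PySem.Dict.mk e.2.2).contains "href" = true ∧
     (PySem.Dict.mk e.2.2).contains "style" = true))
instance (name : String) (max_row : Int) (max_col : Int) (cells : List (Int × Int × List (String × Option String))) (merges : List (List (String × Int))) : Decidable (Pre_render_sheet_html name max_row max_col cells merges) := by unfold Pre_render_sheet_html mergeHasKeys coveredProp; infer_instance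

def pvWitness_render_sheet_html : String × Int × Int × (List (Int × Int × List (String × Option String))) × (List (List (String × Int))) :=
  ("Budget", 1, 2, [(1, 1, [("value", some "x"), ("href", none), ("style", none)])],
   [[("start_row", 1), ("start_col", 1), ("end_row", 1), ("end_col", 2)]])

def Spec_render_sheet_html (name : String) (max_row : Int) (max_col : Int) (cells : List (Int × Int × List (String × Option String))) (merges : List (List (String × Int))) (out : String) : Prop := out = render_sheet_html_alt name max_row max_col cells merges
instance (name : String) (max_row : Int) (max_col : Int) (cells : List (Int × Int × List (String × Option String))) (merges : List (List (String × Int))) (out : String) : Decidable (Spec_render_sheet_html name max_row max_col cells merges out) := by unfold Spec_render_sheet_html; infer_instance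

-- ===== CLAIM (what is proved, stated in full; the proofs are below) =====
def Claim_equal_render_sheet_html : Prop := ∀ (name : String) (max_row : Int) (max_col : Int) (cells : List (Int × Int × List (String × Option String))) (merges : List (List (String × Int))), Dom_render_sheet_html name max_row max_col cells merges → Pre_render_sheet_html name max_row max_col cells merges → Spec_render_sheet_html name max_row max_col cells merges (render_sheet_html name max_row max_col cells merges)

-- ===== LEMMAS AND PROOFS =====

theorem pv_join_nil (l : List (List Char)) : PySem.Chars.join [] l = l.flatten := by
  unfold PySem.Chars.join
  induction l with
  | nil => simp [List.intercalate]
  | cons h t ih => cases t <;> simp_all [List.intercalate, List.intersperse]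

-- membership in the inner column loop of A's covered-building
theorem pv_mem_colsFold (cols : List Int) (row : Int) (st : Int × Int)
    (cov : PySem.Set (Int × Int)) (x : Int × Int) :
    x ∈ cols.foldl (fun cov col =>
      if (row, col) ≠ st then PySem.Set.add cov (row, col) else cov) cov ↔
    x ∈ cov ∨ ∃ col ∈ cols, (row, col) ≠ st ∧ x = (row, col) := by
  induction cols generalizing cov with
  | nil => simp
  | cons c t ih =>
    simp only [List.foldl_cons]
    split_ifs with h
    · rw [ih]; simp [PySem.Set.mem_add]; tauto
    · rw [ih]; simp; tauto

theorem pv_mem_rowsFold (rows cols : List Int) (st : Int × Int)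
    (cov : PySem.Set (Int × Int)) (x : Int × Int) :
    x ∈ rows.foldl (fun cov row =>
      cols.foldl (fun cov col =>
        if (row, col) ≠ st then PySem.Set.add cov (row, col) else cov) cov) cov ↔
    x ∈ cov ∨ ∃ row ∈ rows, ∃ col ∈ cols, (row, col) ≠ st ∧ x = (row, col) := by
  induction rows generalizing cov with
  | nil => simp
  | cons r t ih =>
    simp only [List.foldl_cons]
    rw [ih, pv_mem_colsFold]
    simp only [List.mem_cons]
    constructor
    · rintro ((h | ⟨col, hc, hne, hx⟩) | ⟨row, hr, col, hc, hne, hx⟩)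
      · exact Or.inl h
      · exact Or.inr ⟨r, Or.inl rfl, col, hc, hne, hx⟩
      · exact Or.inr ⟨row, Or.inr hr, col, hc, hne, hx⟩
    · rintro (h | ⟨row, hr | hr, col, hc, hne, hx⟩)
      · exact Or.inl (Or.inl h)
      · subst hr; exact Or.inl (Or.inr ⟨col, hc, hne, hx⟩)
      · exact Or.inr ⟨row, hr, col, hc, hne, hx⟩

theorem pv_mem_covStep (m : List (String × Int)) (cov : PySem.Set (Int × Int)) (x : Int × Int) :
    x ∈ covStep cov m ↔
    x ∈ cov ∨ ∃ row col : Int,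
      mergeGet m "start_row" ≤ row ∧ row < mergeGet m "end_row" + 1 ∧
      mergeGet m "start_col" ≤ col ∧ col < mergeGet m "end_col" + 1 ∧
      (row, col) ≠ startOf m ∧ x = (row, col) := by
  unfold covStep
  rw [pv_mem_rowsFold]
  simp only [PySem.List.mem_pyRange_one]
  constructor
  · rintro (h | ⟨row, ⟨h1, h2⟩, col, ⟨h3, h4⟩, hne, hx⟩)
    · exact Or.inl h
    · exact Or.inr ⟨row, col, h1, h2, h3, h4, hne, hx⟩
  · rintro (h | ⟨row, col, h1, h2, h3, h4, hne, hx⟩)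
    · exact Or.inl h
    · exact Or.inr ⟨row, ⟨h1, h2⟩, col, ⟨h3, h4⟩, hne, hx⟩

theorem pv_mem_coveredFold (merges : List (List (String × Int)))
    (cov : PySem.Set (Int × Int)) (x : Int × Int) :
    x ∈ merges.foldl covStep cov ↔
    x ∈ cov ∨ ∃ m ∈ merges,
      mergeGet m "start_row" ≤ x.1 ∧ x.1 ≤ mergeGet m "end_row" ∧
      mergeGet m "start_col" ≤ x.2 ∧ x.2 ≤ mergeGet m "end_col" ∧ x ≠ startOf m := by
  induction merges generalizing cov with
  | nil => simp
  | cons m t ih =>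
    simp only [List.foldl_cons, ih, pv_mem_covStep]
    constructor
    · rintro ((h | ⟨row, col, h1, h2, h3, h4, h5, h6⟩) | ⟨m', hm', h⟩)
      · exact Or.inl h
      · subst h6; exact Or.inr ⟨m, by simp, h1, by omega, h3, by omega, h5⟩
      · exact Or.inr ⟨m', by simp [hm'], h⟩
    · rintro (h | ⟨m', hm', h1, h2, h3, h4, h5⟩)
      · exact Or.inl (Or.inl h)
      · rcases List.mem_cons.mp hm' with hm' | hm'
        · subst hm'
          exact Or.inl (Or.inr ⟨x.1, x.2, h1, by omega, h3, by omega, by simpa using h5, by simp⟩)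
        · exact Or.inr ⟨m', hm', h1, h2, h3, h4, h5⟩

-- E1: A's `key in covered` test equals B's direct scan of `merges`
theorem pv_covered_eq (merges : List (List (String × Int))) (row col : Int) :
    PySem.Set.contains (merges.foldl covStep PySem.Set.empty) (row, col) =
    mergeCovers merges row col := by
  rw [Bool.eq_iff_iff]
  unfold PySem.Set.contains mergeCovers
  rw [List.contains_iff_mem, pv_mem_coveredFold, List.any_eq_true]
  simp only [PySem.Set.empty, List.not_mem_nil, false_or, Bool.and_eq_true, decide_eq_true_eq,
    Bool.not_eq_true', beq_eq_false_iff_ne, ne_eq, startOf, Prod.mk.injEq, not_and]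
  tauto

-- E2: A's merge_map lookup equals B's last-match scan of `merges`
theorem pv_mergeAt_fold (merges : List (List (String × Int))) (row col : Int)
    (d : PySem.Dict (Int × Int) (List (String × Int)))
    (f0 : Option (List (String × Int))) (h : d.get? (row, col) = f0) :
    (merges.foldl (fun d m => d.insert (startOf m) m) d).get? (row, col) =
    merges.foldl (fun found m =>
      if mergeGet m "start_row" == row && mergeGet m "start_col" == col then some m else found) f0 := by
  induction merges generalizing d f0 with
  | nil => simpa using h
  | cons m t ih =>
    simp only [List.foldl_cons]
    apply ih
    by_cases he : startOf m = (row, col)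
    · rw [he, PySem.Dict.get?_insert_self]
      have hb : (mergeGet m "start_row" == row && mergeGet m "start_col" == col) = true := by
        rw [startOf, Prod.mk.injEq] at he
        simp [he.1, he.2]
      rw [hb]; simp
    · have hne : (row, col) ≠ startOf m := fun hh => he hh.symm
      rw [PySem.Dict.get?_insert_of_ne _ _ hne, h]
      have hb : (mergeGet m "start_row" == row && mergeGet m "start_col" == col) = false := by
        rw [startOf, Prod.mk.injEq, not_and] at he
        simp only [Bool.and_eq_false_iff, beq_eq_false_iff_ne, ne_eq]
        by_cases h1 : mergeGet m "start_row" = row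
        · exact Or.inr (fun h2 => he h1 h2)
        · exact Or.inl h1
      rw [hb]; simp

theorem pv_merge_eq (merges : List (List (String × Int))) (row col : Int) :
    (merges.foldl (fun d m => d.insert (startOf m) m)
      (PySem.Dict.mk [] : PySem.Dict (Int × Int) (List (String × Int)))).get? (row, col) =
    mergeAt merges row col := by
  unfold mergeAt
  exact pv_mergeAt_fold merges row col _ none (by simp [PySem.Dict.get?])

-- st-pair split, skip-if loop shape, and string-level glue for the final proof
theorem pv_st_eq (merges : List (List (String × Int))) :
    merges.foldl (fun st m => (covStep st.1 m, st.2.insert (startOf m) m))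
      ((PySem.Set.empty : PySem.Set (Int × Int)),
       (PySem.Dict.mk [] : PySem.Dict (Int × Int) (List (String × Int)))) =
    (merges.foldl covStep PySem.Set.empty,
     merges.foldl (fun d m => d.insert (startOf m) m) (PySem.Dict.mk [])) :=
  PySem.List.foldl_prod_mk covStep (fun d m => d.insert (startOf m) m) merges PySem.Set.empty (PySem.Dict.mk [])

theorem pv_skip_if (covb : Int → Bool) (f : Int → String) (l : List Int) (acc : List String) :
    l.foldl (fun acc x => if covb x = true then acc else acc ++ [f x]) acc
      = acc ++ (l.filter (fun x => !covb x)).map f := by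
  have he : (fun (acc : List String) x => if covb x = true then acc else acc ++ [f x])
      = (fun acc x => if (!covb x) = true then acc ++ [f x] else acc) := by
    funext acc x; cases covb x <;> simp
  rw [he, PySem.List.foldl_append_if]

theorem pv_toList_empty : "".toList = ([] : List Char) := rfl

theorem pv_flatten_map_flatMap (g : Int → List String) (l : List Int) :
    (List.map String.toList (l.flatMap g)).flatten =
    (l.map (fun r => (List.map String.toList (g r)).flatten)).flatten := by
  induction l with
  | nil => simp
  | cons h t ih => simp [List.flatMap_cons, List.map_append, List.flatten_append, ih]

theorem render_sheet_html_spec : Claim_equal_render_sheet_html := by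
  intro name max_row max_col cells merges _ _
  unfold Spec_render_sheet_html render_sheet_html render_sheet_html_alt
  dsimp only
  rw [pv_st_eq]
  simp only [pv_covered_eq, pv_merge_eq, pv_skip_if,
    PySem.List.foldl_append_singleton_eq_map]
  simp only [List.append_assoc, PySem.List.foldl_append_eq_flatMap]
  apply String.ext
  simp only [PySem.Str.toList_join, pv_join_nil, String.toList_append, List.map_append,
    List.flatten_append, List.map_map, Function.comp_def, List.map_cons, List.map_nil,
    List.flatten_cons, List.flatten_nil, List.nil_append, List.append_assoc, List.append_nil,
    pv_toList_empty, pv_join_nil, pv_flatten_map_flatMap]
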